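-- pv_equiv track=rewrite | github.com/elena-pascal/MC-discrete | fileTools.py | zipData
-- ===== SOURCE A (Python) =====
-- def zipData(myData):
--     '''
--     Data arrives here as a list of tuple, a tuple for each thread.
--     Zip the thread tuples together; returns lists of lists
--     '''
--     zippedParam = []
--
--     for threadData in myData:
--         for indx, param in enumerate(threadData[1]):
--             if (indx < len(zippedParam)):
--                 zippedParam[indx].extend(list(param))
--             else:
--                 zippedParam.append(list(param))
--
--     #return tuple(tuple(param) for param in zippedParam)
--     return zippedParam
-- ===== SOURCE B (Python) =====
-- def zipData(myData):
--     '''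
--     Data arrives here as a list of tuple, a tuple for each thread.
--     Zip the thread tuples together; returns lists of lists
--     '''
--     maxlen = max((len(td[1]) for td in myData), default=0)
--     result = []
--     for i in range(maxlen):
--         row = []
--         for td in myData:
--             if i < len(td[1]):
--                 row.extend(td[1][i])
--         result.append(row)
--     return result
-- ===== Notes on version B (the rewrite author's own statement) =====
-- stated objective: alternative
-- what changed: Inverts the traversal: computes the max row length first, then builds each output row i in one pass over the threads, instead of A's thread-outer loop that grows the accumulator with an extend-or-append branch per index.
import Mathlib
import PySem

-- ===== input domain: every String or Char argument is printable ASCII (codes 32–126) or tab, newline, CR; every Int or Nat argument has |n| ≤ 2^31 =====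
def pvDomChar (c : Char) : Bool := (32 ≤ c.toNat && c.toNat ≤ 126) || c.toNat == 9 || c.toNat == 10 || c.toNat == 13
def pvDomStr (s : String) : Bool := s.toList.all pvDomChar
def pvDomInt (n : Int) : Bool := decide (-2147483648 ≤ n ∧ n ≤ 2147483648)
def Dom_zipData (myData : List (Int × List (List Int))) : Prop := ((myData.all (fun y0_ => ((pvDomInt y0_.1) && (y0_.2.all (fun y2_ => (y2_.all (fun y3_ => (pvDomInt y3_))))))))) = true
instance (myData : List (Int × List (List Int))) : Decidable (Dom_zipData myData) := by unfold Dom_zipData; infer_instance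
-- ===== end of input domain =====

-- B builds each output row by an index-outer pass over the threads instead of A's
-- thread-outer grow-with-extend/append loop; objective: alternative decomposition (same cost).

-- ===== PORT A =====
-- for threadData in myData: for indx, param in enumerate(threadData[1]):
--   if indx < len(zippedParam): zippedParam[indx].extend(list(param)) else: zippedParam.append(list(param))
def zipData (myData : List (Int × List (List Int))) : List (List Int) :=
  myData.foldl
    (fun zippedParam threadData =>
      (PySem.List.enumerate threadData.2).foldl
        (fun z ip =>
          if ip.1 < (z.length : Int) then
            z.modify ip.1.toNat (fun old => old ++ ip.2)   -- zippedParam[indx].extend(list(param))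
          else
            z ++ [ip.2])                                   -- zippedParam.append(list(param))
        zippedParam)
    []

-- ===== PORT B =====
-- maxlen = max((len(td[1]) for td in myData), default=0); then for i in range(maxlen):
--   row = []; for td: if i < len(td[1]): row.extend(td[1][i]); result.append(row)
def zipData_alt (myData : List (Int × List (List Int))) : List (List Int) :=
  let maxlen : Nat := myData.foldl (fun m td => max m td.2.length) 0
  (List.range maxlen).foldl
    (fun result i =>
      result ++ [myData.foldl
        (fun row td => if i < td.2.length then row ++ td.2.getD i [] else row) []])
    []

-- ===== PRECONDITION & SPEC =====
def Spec_zipData (myData : List (Int × List (List Int))) (out : List (List Int)) : Prop := out = zipData_alt myData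
instance (myData : List (Int × List (List Int))) (out : List (List Int)) : Decidable (Spec_zipData myData out) := by unfold Spec_zipData; infer_instance

-- ===== CLAIM (what is proved, stated in full; the proofs are below) =====
def Claim_equal_zipData : Prop := ∀ (myData : List (Int × List (List Int))), Dom_zipData myData → Spec_zipData myData (zipData myData)

-- ===== LEMMAS AND PROOFS =====

/-- Ragged elementwise concatenation: what A's inner loop does to the accumulator. -/
def mergeAux : List (List Int) → List (List Int) → List (List Int)
  | [], bs => bs
  | a :: as, [] => a :: as
  | a :: as, b :: bs => (a ++ b) :: mergeAux as bs

theorem mergeAux_nil_right (a : List (List Int)) : mergeAux a [] = a := by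
  cases a <;> rfl

theorem mergeAux_length (a b : List (List Int)) :
    (mergeAux a b).length = max a.length b.length := by
  induction a generalizing b with
  | nil => cases b <;> simp [mergeAux]
  | cons x xs ih =>
    cases b with
    | nil => simp [mergeAux]
    | cons y ys => simp [mergeAux, ih]

theorem mergeAux_getD (a b : List (List Int)) (i : Nat) :
    (mergeAux a b).getD i [] = a.getD i [] ++ b.getD i [] := by
  induction a generalizing b i with
  | nil => cases b <;> simp [mergeAux]
  | cons x xs ih =>
    cases b with
    | nil => simp [mergeAux]
    | cons y ys =>
      cases i with
      | zero => simp [mergeAux]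
      | succ j => simp only [mergeAux, List.getD_cons_succ]; exact ih ys j

/-- A's inner loop starting at index `k` edits only positions `≥ k`. -/
theorem innerA_eq (L : List (List Int)) (z : List (List Int)) (k : Nat) :
    (PySem.List.enumerate L (k : Int)).foldl
      (fun z ip =>
        if ip.1 < (z.length : Int) then z.modify ip.1.toNat (fun old => old ++ ip.2)
        else z ++ [ip.2]) z
    = z.take k ++ mergeAux (z.drop k) L := by
  induction L generalizing z k with
  | nil =>
    simp [PySem.List.enumerate_nil, mergeAux_nil_right]
  | cons b bs ih =>
    rw [PySem.List.enumerate_cons, List.foldl_cons]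
    by_cases h : k < z.length
    · have hc : ((k : Int) < (z.length : Int)) := by exact_mod_cast h
      simp only [hc, if_pos, Int.toNat_natCast]
      have : ((k : Int) + 1) = ((k + 1 : Nat) : Int) := by push_cast; ring
      rw [this, ih]
      rw [List.modify_eq_take_cons_drop h]
      rw [List.drop_eq_getElem_cons h]
      have hlt : (z.take k).length = k := by simp [List.length_take, Nat.min_eq_left h.le]
      rw [List.take_append, List.drop_append, hlt]
      rw [List.take_of_length_le (l := z.take k) (by rw [hlt]; omega),
          List.drop_eq_nil_of_le (as := z.take k) (by rw [hlt]; omega)]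
      simp [mergeAux]
    · have hc : ¬ ((k : Int) < (z.length : Int)) := by exact_mod_cast h
      simp only [hc, if_neg, not_false_iff]
      have : ((k : Int) + 1) = ((k + 1 : Nat) : Int) := by push_cast; ring
      rw [this, ih]
      have hk : z.length ≤ k := by omega
      rw [List.take_of_length_le (l := z ++ [b]) (by simp; omega),
          List.drop_eq_nil_of_le (as := z ++ [b]) (by simp; omega),
          List.take_of_length_le (l := z) hk, List.drop_eq_nil_of_le (as := z) hk]
      simp [mergeAux]

theorem foldl_snoc_map {α : Type} (g : α → List Int) :
    ∀ (l : List α) (acc : List (List Int)),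
      l.foldl (fun r i => r ++ [g i]) acc = acc ++ l.map g := by
  intro l
  induction l with
  | nil => simp
  | cons x xs ih => intro acc; simp [ih]

theorem F_length (md : List (Int × List (List Int))) :
    ∀ z, (md.foldl (fun z td => mergeAux z td.2) z).length
        = md.foldl (fun m td => max m td.2.length) z.length := by
  induction md with
  | nil => intro z; rfl
  | cons td tds ih =>
    intro z
    simp only [List.foldl_cons]
    rw [ih, mergeAux_length]

theorem F_getD (md : List (Int × List (List Int))) (i : Nat) :
    ∀ z, (md.foldl (fun z td => mergeAux z td.2) z).getD i []
        = md.foldl (fun row td => if i < td.2.length then row ++ td.2.getD i [] else row)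
            (z.getD i []) := by
  induction md with
  | nil => intro z; rfl
  | cons td tds ih =>
    intro z
    simp only [List.foldl_cons]
    rw [ih, mergeAux_getD]
    congr 1
    by_cases h : i < td.2.length
    · simp [h]
    · simp [h]

theorem zipData_foldl_gen (md : List (Int × List (List Int))) :
    ∀ z, md.foldl
        (fun zippedParam threadData =>
          (PySem.List.enumerate threadData.2).foldl
            (fun z ip =>
              if ip.1 < (z.length : Int) then z.modify ip.1.toNat (fun old => old ++ ip.2)
              else z ++ [ip.2]) zippedParam) z
      = md.foldl (fun z td => mergeAux z td.2) z := by
  induction md with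
  | nil => intro z; rfl
  | cons td tds ih =>
    intro z
    simp only [List.foldl_cons]
    rw [show PySem.List.enumerate td.2 = PySem.List.enumerate td.2 ((0 : Nat) : Int) from rfl,
        innerA_eq, ih]
    simp

theorem zipData_eq_foldl_merge (md : List (Int × List (List Int))) :
    zipData md = md.foldl (fun z td => mergeAux z td.2) [] := by
  unfold zipData; exact zipData_foldl_gen md []

-- ===== VERDICT (by name: the statement is the Claim_ definition above) =====
theorem zipData_spec : Claim_equal_zipData := by
  intro md _
  unfold Spec_zipData zipData_alt
  rw [zipData_eq_foldl_merge]
  rw [foldl_snoc_map]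
  simp only [List.nil_append]
  apply List.ext_getElem
  · rw [F_length]; simp
  · intro i h1 h2
    rw [← List.getD_eq_getElem _ [] h1, ← List.getD_eq_getElem _ [] h2]
    rw [F_getD]
    rw [List.getD_eq_getElem?_getD]
    simp [List.getElem?_range (by simpa using h2)]
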